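-- pv_equiv track=rewrite | github.com/Etamin/LLM_struct_exp | ttmgtest.py | generate_ground_truth
-- ===== SOURCE A (Python) =====
-- import itertools
--
-- def generate_ground_truth(specs):
--     """
--     Given a list of mappings from function names to parameter-value lists,
--     produce all concrete function-call strings (ground truth).
--     """
--     calls = []
--     for spec in specs:
--         for func, params in spec.items():
--             # Extract parameter names and their possible values
--             keys, value_lists = zip(*params.items())
--             # Produce Cartesian product of all values
--             for combination in itertools.product(*value_lists):
--                 # Format each argument as key="value"
--                 args = ", ".join(f'{k}="{v}"' for k, v in zip(keys, combination))
--                 calls.append(f"[{func}({args})]")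
--     return calls
-- ===== SOURCE B (Python) =====
-- def generate_ground_truth(specs):
--     """
--     Given a list of mappings from function names to parameter-value lists,
--     produce all concrete function-call strings (ground truth).
--     Incremental Cartesian-product fold instead of itertools.product.
--     """
--     calls = []
--     for spec in specs:
--         for func, params in spec.items():
--             partials = [""]
--             first = True
--             for key, values in params.items():
--                 sep = "" if first else ", "
--                 partials = [p + sep + f'{key}="{v}"' for p in partials for v in values]
--                 first = False
--             for args in partials:
--                 calls.append(f"[{func}({args})]")
--     return calls
-- ===== Notes on version B (the rewrite author's own statement) =====
-- stated objective: faster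
-- what changed: Replaces itertools.product over value tuples (formatted afterwards with zip + per-tuple join) by an incremental Cartesian-product fold that extends partial argument strings key by key, so shared argument prefixes are formatted once instead of once per tuple.
-- crash fix: On specs containing an empty parameter dict A raises ValueError (unpacking zip of no items); B returns the zero-argument call string [func()] for that function. — e.g. on generate_ground_truth([[("f", [])]]): A raises ValueError, B returns ["[f()]"]
import Mathlib
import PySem

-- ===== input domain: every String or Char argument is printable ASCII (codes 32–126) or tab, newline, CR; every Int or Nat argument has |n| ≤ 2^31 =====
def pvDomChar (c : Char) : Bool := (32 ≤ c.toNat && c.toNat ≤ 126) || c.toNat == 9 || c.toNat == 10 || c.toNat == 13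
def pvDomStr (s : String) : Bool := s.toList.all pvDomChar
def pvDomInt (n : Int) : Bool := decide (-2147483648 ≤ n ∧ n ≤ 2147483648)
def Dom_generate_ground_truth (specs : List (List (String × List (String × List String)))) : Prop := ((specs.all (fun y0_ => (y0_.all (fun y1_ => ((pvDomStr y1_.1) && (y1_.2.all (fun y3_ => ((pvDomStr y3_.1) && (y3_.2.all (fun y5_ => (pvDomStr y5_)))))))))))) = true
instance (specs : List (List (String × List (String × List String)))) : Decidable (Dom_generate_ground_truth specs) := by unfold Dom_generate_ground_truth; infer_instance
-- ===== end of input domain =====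

-- B replaces the itertools.product + zip/join formatting by an incremental fold extending
-- partial argument strings key by key (alternative decomposition, same output order).

-- ===== PORT A =====
-- f'{k}="{v}"'
def pvFmtA (kv : String × String) : List Char :=
  kv.1.toList ++ '=' :: '"' :: (kv.2.toList ++ ['"'])

-- itertools.product(*value_lists): first list varies slowest, last fastest
def pvProdA : List (List String) → List (List String)
  | [] => [[]]
  | vs :: rest => vs.flatMap (fun v => (pvProdA rest).map (fun combo => v :: combo))

-- f"[{func}({args})]" with args = ", ".join(f'{k}="{v}"' …)
def pvCallA (func : String) (keys : List String) (combo : List String) : String :=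
  String.mk ('[' :: (func.toList ++ '(' ::
    (PySem.Chars.join (", ".toList) ((keys.zip combo).map pvFmtA) ++ [')', ']'])))

def generate_ground_truth (specs : List (List (String × List (String × List String)))) : List String :=
  specs.foldl (fun calls spec =>
    spec.foldl (fun calls fp =>
      -- keys, value_lists = zip(*params.items())
      let kv := fp.2.unzip
      (pvProdA kv.2).foldl (fun calls combo => calls ++ [pvCallA fp.1 kv.1 combo]) calls)
      calls) []

-- ===== PORT B =====
-- p + sep + f'{key}="{v}"'
def pvFragB (sep : List Char) (k v : String) : List Char :=
  sep ++ (k.toList ++ '=' :: '"' :: (v.toList ++ ['"']))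

-- one step of the fold over params.items(): state = (partials, first)
def pvStepB (st : List (List Char) × Bool) (kv : String × List String) : List (List Char) × Bool :=
  let sep := if st.2 then [] else (", ".toList)
  (st.1.flatMap (fun p => kv.2.map (fun v => p ++ pvFragB sep kv.1 v)), false)

-- f"[{func}({args})]"
def pvWrapB (func : String) (args : List Char) : String :=
  String.mk ('[' :: (func.toList ++ '(' :: (args ++ [')', ']'])))

def generate_ground_truth_alt (specs : List (List (String × List (String × List String)))) : List String :=
  specs.foldl (fun calls spec =>
    spec.foldl (fun calls fp =>
      let partials := (fp.2.foldl pvStepB ([[]], true)).1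
      calls ++ partials.map (pvWrapB fp.1))
      calls) []

-- ===== PRECONDITION & SPEC =====
-- Pre_ excludes (a) specs containing an empty parameter dict, where Python A raises
-- ValueError while unpacking zip(*params.items()), and (b) association lists with duplicate
-- keys at either dict level, which no Python dict input can represent.
def Pre_generate_ground_truth (specs : List (List (String × List (String × List String)))) : Prop :=
  ∀ spec ∈ specs, (spec.map (·.1)).Nodup ∧
    ∀ fp ∈ spec, fp.2 ≠ [] ∧ (fp.2.map (·.1)).Nodup
instance (specs : List (List (String × List (String × List String)))) : Decidable (Pre_generate_ground_truth specs) := by unfold Pre_generate_ground_truth; infer_instance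
def pvWitness_generate_ground_truth : (List (List (String × List (String × List String)))) :=
  [[("f", [("a", ["1", "2"]), ("b", ["x"])])]]

-- On specs containing an empty parameter dict A raises ValueError (unpacking zip of no
-- items); B returns the zero-argument call string "[func()]" for that function.
def Raises_generate_ground_truth (specs : List (List (String × List (String × List String)))) : Prop :=
  (∀ spec ∈ specs, (spec.map (·.1)).Nodup ∧ ∀ fp ∈ spec, (fp.2.map (·.1)).Nodup) ∧
    ∃ spec ∈ specs, ∃ fp ∈ spec, fp.2 = []
instance (specs : List (List (String × List (String × List String)))) : Decidable (Raises_generate_ground_truth specs) := by unfold Raises_generate_ground_truth; infer_instance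
def pvRaiseWitness_generate_ground_truth : (List (List (String × List (String × List String)))) :=
  [[("f", [])]]
def pvRaiseWitnessOut_generate_ground_truth : List String := ["[f()]"]

def Spec_generate_ground_truth (specs : List (List (String × List (String × List String)))) (out : List String) : Prop := out = generate_ground_truth_alt specs
instance (specs : List (List (String × List (String × List String)))) (out : List String) : Decidable (Spec_generate_ground_truth specs out) := by unfold Spec_generate_ground_truth; infer_instance

-- ===== CLAIM (what is proved, stated in full; the proofs are below) =====
def Claim_equal_generate_ground_truth : Prop := ∀ (specs : List (List (String × List (String × List String)))), Dom_generate_ground_truth specs → Pre_generate_ground_truth specs → Spec_generate_ground_truth specs (generate_ground_truth specs)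

def Claim_raises_generate_ground_truth : Prop := (∀ (specs : List (List (String × List (String × List String)))), Dom_generate_ground_truth specs → Raises_generate_ground_truth specs → ¬ Pre_generate_ground_truth specs) ∧ (Dom_generate_ground_truth (pvRaiseWitness_generate_ground_truth) ∧ Raises_generate_ground_truth (pvRaiseWitness_generate_ground_truth) ∧ generate_ground_truth_alt (pvRaiseWitness_generate_ground_truth) = pvRaiseWitnessOut_generate_ground_truth)

-- ===== LEMMAS AND PROOFS =====

-- what B's fold produces once past the first key: every later argument fragment carries a ", " prefix
def pvTailArgs : List (String × List String) → List (List Char)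
  | [] => [[]]
  | (k, vs) :: ps => vs.flatMap (fun v => (pvTailArgs ps).map (fun t => pvFragB (", ".toList) k v ++ t))

theorem pvStepB_false (ps : List (String × List String)) (acc : List (List Char)) :
    ps.foldl pvStepB (acc, false) =
      (acc.flatMap (fun p => (pvTailArgs ps).map (fun t => p ++ t)), false) := by
  induction ps generalizing acc with
  | nil => simp [pvTailArgs]
  | cons kv ps ih =>
    obtain ⟨k, vs⟩ := kv
    simp only [List.foldl_cons, pvStepB, if_neg (Bool.false_ne_true), ih, pvTailArgs]
    congr 1
    rw [List.flatMap_assoc]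
    refine List.flatMap_congr ?_
    intro p _
    simp [List.flatMap_map, List.map_flatMap, List.map_map, Function.comp_def,
      List.append_assoc]

theorem pvTailArgs_eq (ps : List (String × List String)) :
    pvTailArgs ps = (pvProdA (ps.unzip.2)).map (fun combo =>
      (((ps.unzip.1).zip combo).map (fun kv => (", ".toList) ++ pvFmtA kv)).flatten) := by
  induction ps with
  | nil => simp [pvTailArgs, pvProdA]
  | cons kv ps ih =>
    obtain ⟨k, vs⟩ := kv
    simp only [pvTailArgs, ih, List.unzip_cons, pvProdA]
    simp only [List.map_flatMap, List.map_map]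
    refine List.flatMap_congr ?_
    intro v _
    refine List.map_congr_left ?_
    intro combo _
    simp [pvFragB, pvFmtA, List.append_assoc]

theorem pv_join_eq (ks : List String) (combo : List String) (k v : String) :
    PySem.Chars.join (", ".toList) (((k :: ks).zip (v :: combo)).map pvFmtA) =
      pvFmtA (k, v) ++ ((ks.zip combo).map (fun kv => (", ".toList) ++ pvFmtA kv)).flatten := by
  induction ks generalizing combo k v with
  | nil => simp [PySem.Chars.join_singleton]
  | cons k' ks ih =>
    cases combo with
    | nil => simp [PySem.Chars.join_singleton]
    | cons v' combo =>
      have hsep : (", ".toList) = [',', ' '] := rfl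
      simp only [List.zip_cons_cons, List.map_cons, PySem.Chars.join_cons_cons]
      have h2 := ih combo k' v'
      simp only [List.zip_cons_cons, List.map_cons, hsep] at h2 ⊢
      simp [h2, List.append_assoc]

theorem pvPartials_eq (ps : List (String × List String)) :
    (ps.foldl pvStepB ([[]], true)).1 =
      (pvProdA (ps.unzip.2)).map (fun combo =>
        PySem.Chars.join (", ".toList) (((ps.unzip.1).zip combo).map pvFmtA)) := by
  cases ps with
  | nil => simp [pvProdA, PySem.Chars.join_nil]
  | cons kv ps =>
    obtain ⟨k, vs⟩ := kv
    simp only [List.foldl_cons, pvStepB, pvStepB_false, pvTailArgs_eq,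
      List.unzip_cons, pvProdA]
    simp only [if_true, List.flatMap_cons, List.flatMap_nil, List.append_nil,
      List.nil_append, List.flatMap_map, List.map_flatMap, List.map_map]
    refine List.flatMap_congr ?_
    intro v _
    refine List.map_congr_left ?_
    intro combo _
    simp only [Function.comp_apply]
    rw [pv_join_eq]
    simp [pvFragB, pvFmtA]

theorem pvInner_eq (fp : String × List (String × List String)) (calls : List String) :
    (pvProdA fp.2.unzip.2).foldl
        (fun calls combo => calls ++ [pvCallA fp.1 fp.2.unzip.1 combo]) calls =
      calls ++ ((fp.2.foldl pvStepB ([[]], true)).1).map (pvWrapB fp.1) := by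
  rw [PySem.List.foldl_append_singleton_eq_map, pvPartials_eq, List.map_map]
  rfl

-- ===== VERDICT (by name: the statement is the Claim_ definition above) =====
theorem generate_ground_truth_spec : Claim_equal_generate_ground_truth := by
  intro specs _ _
  unfold Spec_generate_ground_truth generate_ground_truth generate_ground_truth_alt
  refine PySem.List.foldl_congr_mem _ _ _ _ ?_
  intro calls spec _
  refine PySem.List.foldl_congr_mem _ _ _ _ ?_
  intro calls fp _
  exact pvInner_eq fp calls

def generate_ground_truth_raises : Claim_raises_generate_ground_truth := by
  unfold Claim_raises_generate_ground_truth
  constructor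
  · intro specs _ hr hp
    obtain ⟨_, spec, hs, fp, hf, he⟩ := hr
    exact ((hp spec hs).2 fp hf).1 he
  · exact ⟨by decide, by decide, by decide⟩
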